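-- pv_equiv track=rewrite | github.com/philippe176/neurofeedback_hackathon | webapp/emulator_bridge.py | _window_indices_with_class_floor
-- ===== SOURCE A (Python) =====
-- def _window_indices_with_class_floor(
--
--     labels: list[int | None],
--     window: int,
--     min_per_class: int,
-- ) -> list[int]:
--     total = len(labels)
--     if total == 0:
--         return []
--
--     start = max(0, total - max(1, int(window)))
--     selected = set(range(start, total))
--
--     for cls in range(4):
--         class_indices = [idx for idx, label in enumerate(labels) if label == cls]
--         if not class_indices:
--             continue
--         take = min(len(class_indices), max(1, int(min_per_class)))
--         selected.update(class_indices[-take:])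
--
--     return sorted(selected)
-- ===== SOURCE B (Python) =====
-- def _window_indices_with_class_floor(
--     labels: list[int | None],
--     window: int,
--     min_per_class: int,
-- ) -> list[int]:
--     total = len(labels)
--     if total == 0:
--         return []
--
--     start = max(0, total - max(1, int(window)))
--     floor = max(1, int(min_per_class))
--
--     # one counting pass: occurrences of each class 0..3
--     counts = [0, 0, 0, 0]
--     for lab in labels:
--         if lab is not None and 0 <= lab < 4:
--             counts[lab] += 1
--     # skip[c]: earliest occurrences of class c that fall outside its kept tail
--     skip = [c - min(c, floor) for c in counts]
--
--     # one output pass: emit i when it is in the tail window or in its class's kept tail;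
--     # the output is built already sorted, no set and no sort needed
--     out = []
--     seen = [0, 0, 0, 0]
--     for i, lab in enumerate(labels):
--         keep = i >= start
--         if lab is not None and 0 <= lab < 4:
--             if seen[lab] >= skip[lab]:
--                 keep = True
--             seen[lab] += 1
--         if keep:
--             out.append(i)
--     return out
-- ===== Notes on version B (the rewrite author's own statement) =====
-- stated objective: alternative
-- what changed: B replaces A's build-a-set-then-sort (four enumerate scans plus sorted()) by two linear passes: one pass counts class occurrences, a second pass emits indices already in order using occurrence ranks, so no set and no sort are needed.
import Mathlib
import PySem

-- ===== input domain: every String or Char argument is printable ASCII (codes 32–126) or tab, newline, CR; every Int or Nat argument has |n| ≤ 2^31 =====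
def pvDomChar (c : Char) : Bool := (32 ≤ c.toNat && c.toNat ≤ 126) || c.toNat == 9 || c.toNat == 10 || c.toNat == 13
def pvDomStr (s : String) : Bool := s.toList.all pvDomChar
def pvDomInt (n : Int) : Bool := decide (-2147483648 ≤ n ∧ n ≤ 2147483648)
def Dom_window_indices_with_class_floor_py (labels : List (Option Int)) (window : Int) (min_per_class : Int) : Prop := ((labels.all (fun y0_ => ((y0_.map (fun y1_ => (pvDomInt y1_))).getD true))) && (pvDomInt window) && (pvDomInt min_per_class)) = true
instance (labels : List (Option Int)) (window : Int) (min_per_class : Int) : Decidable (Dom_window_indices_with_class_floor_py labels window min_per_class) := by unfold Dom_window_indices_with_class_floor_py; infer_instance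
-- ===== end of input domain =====

-- B replaces A's build-a-set-then-sort by two linear passes (count class occurrences, then
-- emit indices already in order by occurrence rank); objective: alternative algorithm.

-- ===== PORT A =====
-- loop body of A's 'for cls in range(4)' (keeps A's steps verbatim)
def stepA (labels : List (Option Int)) (min_per_class : Int) (sel : PySem.Set Int) (cls : Int) : PySem.Set Int :=
  let class_indices : List Int :=
    ((PySem.List.enumerate labels 0).filter (fun p => p.2 == some cls)).map (fun p => p.1)
  if class_indices = [] then sel
  else
    let take : Int := min (class_indices.length : Int) (max 1 min_per_class)
    PySem.Set.update sel (PySem.List.slice class_indices (some (-take)) none)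

def window_indices_with_class_floor_py (labels : List (Option Int)) (window : Int) (min_per_class : Int) : List Int :=
  let total : Int := labels.length
  if total = 0 then []
  else
    let start : Int := max 0 (total - max 1 window)
    let selected : PySem.Set Int := PySem.Set.ofList (PySem.List.pyRange start total 1)
    let selected := (PySem.List.pyRange 0 4 1).foldl (stepA labels min_per_class) selected
    PySem.List.sorted selected (fun x => x) false

-- ===== PORT B =====
-- loop body of B's counting pass
def stepCnt (counts : List Int) (lab : Option Int) : List Int :=
  match lab with
  | some v => if 0 ≤ v ∧ v < 4 then counts.modify v.toNat (· + 1) else counts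
  | none => counts

-- loop body of B's output pass; state = (seen, out)
def stepB (start : Int) (skip : List Int) (st : List Int × List Int) (p : Int × Option Int) :
    List Int × List Int :=
  match p.2 with
  | some v =>
    if 0 ≤ v ∧ v < 4 then
      (st.1.modify v.toNat (· + 1),
       if p.1 ≥ start ∨ skip.getD v.toNat 0 ≤ st.1.getD v.toNat 0 then st.2 ++ [p.1] else st.2)
    else (st.1, if p.1 ≥ start then st.2 ++ [p.1] else st.2)
  | none => (st.1, if p.1 ≥ start then st.2 ++ [p.1] else st.2)

def window_indices_with_class_floor_py_alt (labels : List (Option Int)) (window : Int) (min_per_class : Int) : List Int :=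
  let total : Int := labels.length
  if total = 0 then []
  else
    let start : Int := max 0 (total - max 1 window)
    let floor : Int := max 1 min_per_class
    let counts : List Int := labels.foldl stepCnt [0, 0, 0, 0]
    let skip : List Int := counts.map (fun c => c - min c floor)
    ((PySem.List.enumerate labels 0).foldl (stepB start skip) (([0, 0, 0, 0] : List Int), ([] : List Int))).2

-- ===== PRECONDITION & SPEC =====
def Spec_window_indices_with_class_floor_py (labels : List (Option Int)) (window : Int) (min_per_class : Int) (out : List Int) : Prop := out = window_indices_with_class_floor_py_alt labels window min_per_class
instance (labels : List (Option Int)) (window : Int) (min_per_class : Int) (out : List Int) : Decidable (Spec_window_indices_with_class_floor_py labels window min_per_class out) := by unfold Spec_window_indices_with_class_floor_py; infer_instance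

-- ===== CLAIM (what is proved, stated in full; the proofs are below) =====
def Claim_equal_window_indices_with_class_floor_py : Prop := ∀ (labels : List (Option Int)) (window : Int) (min_per_class : Int), Dom_window_indices_with_class_floor_py labels window min_per_class → Spec_window_indices_with_class_floor_py labels window min_per_class (window_indices_with_class_floor_py labels window min_per_class)

-- ===== LEMMAS AND PROOFS =====

-- indices of class v in `labels`, offset by s (A's 'class_indices' with general offset)
def ci (labels : List (Option Int)) (s v : Int) : List Int :=
  ((PySem.List.enumerate labels s).filter (fun p => p.2 == some v)).map (fun p => p.1)

-- how many leading class-v indices A's slice drops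
def dropCnt (labels : List (Option Int)) (min_per_class v : Int) : Nat :=
  (ci labels 0 v).length - (min ((ci labels 0 v).length : Int) (max 1 min_per_class)).toNat

-- the list B's output loop appends, as a structural recursion
def keptB (start : Int) (skip : List Int) : List (Option Int) → Int → List Int → List Int
  | [], _, _ => []
  | none :: ls, s, seen => (if s ≥ start then [s] else []) ++ keptB start skip ls (s + 1) seen
  | some v :: ls, s, seen =>
      if 0 ≤ v ∧ v < 4 then
        (if s ≥ start ∨ skip.getD v.toNat 0 ≤ seen.getD v.toNat 0 then [s] else [])
          ++ keptB start skip ls (s + 1) (seen.modify v.toNat (· + 1))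
      else (if s ≥ start then [s] else []) ++ keptB start skip ls (s + 1) seen

lemma ci_cons (x : Option Int) (ls : List (Option Int)) (s v : Int) :
    ci (x :: ls) s v = (if x = some v then [s] else []) ++ ci ls (s + 1) v := by
  by_cases h : x = some v <;> simp [ci, PySem.List.enumerate_cons, h]

lemma ci_length (ls : List (Option Int)) (s v : Int) :
    (ci ls s v).length = ls.count (some v) := by
  induction ls generalizing s with
  | nil => simp [ci]
  | cons x ls ih =>
    rw [ci_cons]
    by_cases h : x = some v <;> simp [h, ih]

lemma mem_drop_ci (ls : List (Option Int)) (s v : Int) (k : Nat) (i : Int) :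
    i ∈ (ci ls s v).drop k ↔
      ∃ j : Nat, j < ls.length ∧ i = s + j ∧ ls[j]? = some (some v) ∧
        k ≤ (ls.take j).count (some v) := by
  induction ls generalizing s k with
  | nil => simp [ci]
  | cons x ls ih =>
    rw [ci_cons]
    by_cases hx : x = some v
    · subst hx
      simp only [if_true, List.singleton_append]
      cases k with
      | zero =>
        simp only [List.drop_zero, List.mem_cons]
        rw [show ci ls (s+1) v = (ci ls (s+1) v).drop 0 from rfl, ih]
        constructor
        · rintro (rfl | ⟨j, hj, rfl, hg, hc⟩)
          · exact ⟨0, by simp⟩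
          · exact ⟨j + 1, by simpa using hj, by push_cast; ring, by simpa using hg, by simp⟩
        · rintro ⟨j, hj, rfl, hg, hc⟩
          cases j with
          | zero => left; simp
          | succ j =>
            right
            refine ⟨j, by simpa using hj, by push_cast; ring, by simpa using hg, by simp⟩
      | succ k' =>
        rw [List.drop_succ_cons, ih]
        constructor
        · rintro ⟨j, hj, rfl, hg, hc⟩
          refine ⟨j + 1, by simpa using hj, by push_cast; ring, by simpa using hg, ?_⟩
          simpa [List.count_cons] using hc
        · rintro ⟨j, hj, rfl, hg, hc⟩
          cases j with
          | zero => simp at hg hc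
          | succ j =>
            refine ⟨j, by simpa using hj, by push_cast; ring, by simpa using hg, ?_⟩
            simp at hc
            omega
    · simp only [if_neg hx, List.nil_append]
      rw [ih]
      constructor
      · rintro ⟨j, hj, rfl, hg, hc⟩
        refine ⟨j + 1, by simpa using hj, by push_cast; ring, by simpa using hg, ?_⟩
        simpa [List.count_cons, hx] using hc
      · rintro ⟨j, hj, rfl, hg, hc⟩
        cases j with
        | zero => simp at hg; exact absurd hg hx
        | succ j =>
          refine ⟨j, by simpa using hj, by push_cast; ring, by simpa using hg, ?_⟩
          simpa [List.count_cons, hx] using hc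

lemma mem_stepA (labels : List (Option Int)) (mpc : Int) (sel : PySem.Set Int) (cls i : Int) :
    i ∈ stepA labels mpc sel cls ↔
      i ∈ sel ∨ i ∈ (ci labels 0 cls).drop (dropCnt labels mpc cls) := by
  unfold stepA
  simp only []
  have hci : ((PySem.List.enumerate labels 0).filter (fun p => p.2 == some cls)).map (fun p => p.1) = ci labels 0 cls := rfl
  rw [hci]
  split
  · rename_i hE
    simp [hE, dropCnt]
  · rename_i hE
    have hlen : 1 ≤ (ci labels 0 cls).length := by
      rcases List.exists_cons_of_ne_nil hE with ⟨a, t, h⟩; simp [h]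
    set L := (ci labels 0 cls).length with hL
    set take : Int := min (L : Int) (max 1 mpc) with htake
    have h1 : 1 ≤ take := by
      have : (1 : Int) ≤ L := by exact_mod_cast hlen
      simp [htake]; omega
    have hk : -take = -((take.toNat : Nat) : Int) := by
      rw [Int.toNat_of_nonneg (by omega)]
    rw [hk, PySem.List.slice_from_neg_natCast (ci labels 0 cls) take.toNat (by omega),
      PySem.Set.mem_update]
    have : L - take.toNat = dropCnt labels mpc cls := by
      simp [dropCnt, htake, hL]
    rw [this]

lemma nodup_stepA (labels : List (Option Int)) (mpc : Int) (sel : PySem.Set Int) (cls : Int)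
    (h : sel.Nodup) : (stepA labels mpc sel cls).Nodup := by
  unfold stepA
  simp only []
  split
  · exact h
  · exact PySem.Set.nodup_update _ _ h

lemma mem_foldl_stepA (labels : List (Option Int)) (mpc : Int) (cs : List Int)
    (sel : PySem.Set Int) (i : Int) :
    i ∈ cs.foldl (stepA labels mpc) sel ↔
      i ∈ sel ∨ ∃ v ∈ cs, i ∈ (ci labels 0 v).drop (dropCnt labels mpc v) := by
  induction cs generalizing sel with
  | nil => simp
  | cons c cs ih =>
    simp only [List.foldl_cons, ih, mem_stepA, List.mem_cons]
    constructor
    · rintro ((h | h) | ⟨v, hv, h⟩)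
      · exact Or.inl h
      · exact Or.inr ⟨c, Or.inl rfl, h⟩
      · exact Or.inr ⟨v, Or.inr hv, h⟩
    · rintro (h | ⟨v, (rfl | hv), h⟩)
      · exact Or.inl (Or.inl h)
      · exact Or.inl (Or.inr h)
      · exact Or.inr ⟨v, hv, h⟩

lemma nodup_foldl_stepA (labels : List (Option Int)) (mpc : Int) (cs : List Int)
    (sel : PySem.Set Int) (h : sel.Nodup) : (cs.foldl (stepA labels mpc) sel).Nodup := by
  induction cs generalizing sel with
  | nil => exact h
  | cons c cs ih => exact ih _ (nodup_stepA _ _ _ _ h)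

lemma getD_modify_self (l : List Int) (k : Nat) (hk : k < l.length) :
    ((l.modify k (· + 1))[k]?).getD 0 = (l[k]?).getD 0 + 1 := by
  simp [hk]

lemma getD_modify_ne (l : List Int) (k j : Nat) (h : k ≠ j) :
    ((l.modify k (· + 1))[j]?).getD 0 = (l[j]?).getD 0 := by
  simp [List.getElem?_modify_ne _ _ h]

lemma cnt_length (ls : List (Option Int)) (init : List Int) :
    (ls.foldl stepCnt init).length = init.length := by
  induction ls generalizing init with
  | nil => rfl
  | cons x ls ih =>
    simp only [List.foldl_cons, ih]
    cases x with
    | none => rfl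
    | some v => simp [stepCnt]; split <;> simp

lemma cnt_getD (ls : List (Option Int)) (init : List Int) (hlen : init.length = 4)
    (v : Int) (hv : 0 ≤ v ∧ v < 4) :
    ((ls.foldl stepCnt init)[v.toNat]?).getD 0
      = (init[v.toNat]?).getD 0 + (ls.count (some v) : Int) := by
  induction ls generalizing init with
  | nil => simp
  | cons x ls ih =>
    simp only [List.foldl_cons, List.count_cons]
    cases x with
    | none =>
      rw [show stepCnt init none = init from rfl, ih init hlen]
      simp
    | some w =>
      by_cases hw : 0 ≤ w ∧ w < 4
      · rw [show stepCnt init (some w) = init.modify w.toNat (· + 1) from by simp [stepCnt, hw]]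
        rw [ih _ (by simp [hlen])]
        by_cases hvw : w = v
        · subst hvw
          rw [getD_modify_self _ _ (by omega)]
          simp; ring
        · rw [getD_modify_ne _ _ _ (by omega)]
          have hne : (some w == some v) = false := by simp [hvw]
          simp [hne]
      · rw [show stepCnt init (some w) = init from by simp [stepCnt, hw]]
        rw [ih init hlen]
        have hne' : w ≠ v := by rintro rfl; exact hw hv
        have hne : (some w == some v) = false := by simp [hne']
        simp [hne]

lemma foldl_stepB (start : Int) (skip : List Int) (ls : List (Option Int)) (s : Int)
    (seen out : List Int) :
    ((PySem.List.enumerate ls s).foldl (stepB start skip) (seen, out)).2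
      = out ++ keptB start skip ls s seen := by
  induction ls generalizing s seen out with
  | nil => simp [keptB]
  | cons x ls ih =>
    rw [PySem.List.enumerate_cons, List.foldl_cons]
    cases x with
    | none =>
      rw [show stepB start skip (seen, out) (s, none)
          = (seen, if s ≥ start then out ++ [s] else out) from rfl]
      rw [ih, keptB]
      split <;> simp
    | some v =>
      by_cases hv : 0 ≤ v ∧ v < 4
      · rw [show stepB start skip (seen, out) (s, some v)
            = (seen.modify v.toNat (· + 1),
               if s ≥ start ∨ skip.getD v.toNat 0 ≤ seen.getD v.toNat 0 then out ++ [s] else out)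
           from by simp [stepB, hv]]
        rw [ih, keptB]
        simp only [if_pos hv]
        split <;> simp
      · rw [show stepB start skip (seen, out) (s, some v)
            = (seen, if s ≥ start then out ++ [s] else out) from by simp [stepB, hv]]
        rw [ih, keptB]
        simp only [if_neg hv]
        split <;> simp

lemma kept_lb (start : Int) (skip : List Int) (ls : List (Option Int)) (s : Int)
    (seen : List Int) : ∀ i ∈ keptB start skip ls s seen, s ≤ i := by
  induction ls generalizing s seen with
  | nil => simp [keptB]
  | cons x ls ih =>
    intro i hi
    have tail : ∀ seen', i ∈ keptB start skip ls (s + 1) seen' → s ≤ i := by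
      intro seen' h; have := ih (s + 1) seen' i h; omega
    cases x with
    | none =>
      rw [keptB] at hi
      rcases List.mem_append.1 hi with h | h
      · split at h <;> simp at h; omega
      · exact tail _ h
    | some v =>
      rw [keptB] at hi
      split at hi <;> rcases List.mem_append.1 hi with h | h
      · split at h <;> simp at h; omega
      · exact tail _ h
      · split at h <;> simp at h; omega
      · exact tail _ h

lemma kept_pairwise (start : Int) (skip : List Int) (ls : List (Option Int)) (s : Int)
    (seen : List Int) : (keptB start skip ls s seen).Pairwise (· < ·) := by
  induction ls generalizing s seen with
  | nil => simp [keptB]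
  | cons x ls ih =>
    have hpair : ∀ (c : List Int) seen', (c = [] ∨ c = [s]) →
        ((c ++ keptB start skip ls (s + 1) seen').Pairwise (· < ·)) := by
      intro c seen' hc
      apply List.pairwise_append.2
      refine ⟨?_, ih (s + 1) seen', ?_⟩
      · rcases hc with rfl | rfl <;> simp
      · intro a ha b hb
        have := kept_lb start skip ls (s + 1) seen' b hb
        have ha' : a = s := by rcases hc with rfl | rfl <;> simp_all
        omega
    cases x with
    | none =>
      rw [keptB]; exact hpair _ _ (by split <;> simp)
    | some v =>
      rw [keptB]; split
      · exact hpair _ _ (by split <;> simp)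
      · exact hpair _ _ (by split <;> simp)

lemma kept_mem (start : Int) (skip : List Int) (ls : List (Option Int)) (s : Int)
    (seen : List Int) (hlen : seen.length = 4) (i : Int) :
    i ∈ keptB start skip ls s seen ↔
      ∃ j : Nat, j < ls.length ∧ i = s + j ∧
        (start ≤ i ∨ ∃ v : Int, ls[j]? = some (some v) ∧ 0 ≤ v ∧ v < 4 ∧
          (skip[v.toNat]?).getD 0 ≤ (seen[v.toNat]?).getD 0 + ((ls.take j).count (some v) : Int)) := by
  induction ls generalizing s seen with
  | nil => simp [keptB]
  | cons x ls ih =>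
    have hsplit : ∀ (c : List Int) seen', seen'.length = 4 →
        (i ∈ c ++ keptB start skip ls (s + 1) seen' ↔ i ∈ c ∨ ∃ j : Nat, j < ls.length ∧ i = (s+1) + j ∧
          (start ≤ i ∨ ∃ v : Int, ls[j]? = some (some v) ∧ 0 ≤ v ∧ v < 4 ∧
            (skip[v.toNat]?).getD 0 ≤ (seen'[v.toNat]?).getD 0 + ((ls.take j).count (some v) : Int))) := by
      intro c seen' hl'
      rw [List.mem_append, ih (s+1) seen' hl']
    cases x with
    | none =>
      rw [keptB, hsplit _ _ hlen]
      constructor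
      · rintro (h | ⟨j, hj, rfl, hrest⟩)
        · split at h <;> simp at h
          subst h
          exact ⟨0, by simp, by simp, Or.inl (by omega)⟩
        · refine ⟨j + 1, by simpa using hj, by push_cast; ring, ?_⟩
          rcases hrest with h | ⟨v, hg, hv1, hv2, hc⟩
          · exact Or.inl h
          · exact Or.inr ⟨v, by simpa using hg, hv1, hv2, by simpa using hc⟩
      · rintro ⟨j, hj, rfl, hrest⟩
        cases j with
        | zero =>
          rcases hrest with h | ⟨v, hg, _⟩
          · left; simp at h ⊢; omega
          · simp at hg
        | succ j =>
          right
          refine ⟨j, by simpa using hj, by push_cast; ring, ?_⟩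
          rcases hrest with h | ⟨v, hg, hv1, hv2, hc⟩
          · exact Or.inl h
          · exact Or.inr ⟨v, by simpa using hg, hv1, hv2, by simpa using hc⟩
    | some w =>
      rw [keptB]
      by_cases hw : 0 ≤ w ∧ w < 4
      · rw [if_pos hw, hsplit _ _ (by simp [hlen]), List.getD_eq_getElem?_getD,
          List.getD_eq_getElem?_getD]
        constructor
        · rintro (h | ⟨j, hj, rfl, hrest⟩)
          · split at h <;> simp at h
            subst h
            rename_i hcond
            refine ⟨0, by simp, by simp, ?_⟩
            rcases hcond with h | h
            · exact Or.inl (by omega)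
            · exact Or.inr ⟨w, by simp, hw.1, hw.2, by simpa using h⟩
          · refine ⟨j + 1, by simpa using hj, by push_cast; ring, ?_⟩
            rcases hrest with h | ⟨v, hg, hv1, hv2, hc⟩
            · exact Or.inl h
            · refine Or.inr ⟨v, by simpa using hg, hv1, hv2, ?_⟩
              by_cases hvw : w = v
              · subst hvw
                rw [getD_modify_self _ _ (by omega)] at hc
                simp
                omega
              · rw [getD_modify_ne _ _ _ (by omega)] at hc
                have hne : (some w == some v) = false := by simp [hvw]
                simpa [List.count_cons, hne] using hc
        · rintro ⟨j, hj, rfl, hrest⟩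
          cases j with
          | zero =>
            left
            rcases hrest with h | ⟨v, hg, hv1, hv2, hc⟩
            · simp at h ⊢
              exact Or.inl (by omega)
            · simp at hg; subst hg
              simp at hc ⊢
              exact Or.inr hc
          | succ j =>
            right
            refine ⟨j, by simpa using hj, by push_cast; ring, ?_⟩
            rcases hrest with h | ⟨v, hg, hv1, hv2, hc⟩
            · exact Or.inl h
            · refine Or.inr ⟨v, by simpa using hg, hv1, hv2, ?_⟩
              by_cases hvw : w = v
              · subst hvw
                rw [getD_modify_self _ _ (by omega)]
                simp at hc
                omega
              · rw [getD_modify_ne _ _ _ (by omega)]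
                have hne : (some w == some v) = false := by simp [hvw]
                simpa [List.count_cons, hne] using hc
      · rw [if_neg hw, hsplit _ _ hlen]
        constructor
        · rintro (h | ⟨j, hj, rfl, hrest⟩)
          · split at h <;> simp at h
            subst h
            exact ⟨0, by simp, by simp, Or.inl (by omega)⟩
          · refine ⟨j + 1, by simpa using hj, by push_cast; ring, ?_⟩
            rcases hrest with h | ⟨v, hg, hv1, hv2, hc⟩
            · exact Or.inl h
            · refine Or.inr ⟨v, by simpa using hg, hv1, hv2, ?_⟩
              have hne : (some w == some v) = false := by
                simp; rintro rfl; exact hw ⟨hv1, hv2⟩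
              simpa [List.count_cons, hne] using hc
        · rintro ⟨j, hj, rfl, hrest⟩
          cases j with
          | zero =>
            left
            rcases hrest with h | ⟨v, hg, hv1, hv2, hc⟩
            · simp at h ⊢; omega
            · simp at hg; subst hg; exact absurd ⟨hv1, hv2⟩ hw
          | succ j =>
            right
            refine ⟨j, by simpa using hj, by push_cast; ring, ?_⟩
            rcases hrest with h | ⟨v, hg, hv1, hv2, hc⟩
            · exact Or.inl h
            · refine Or.inr ⟨v, by simpa using hg, hv1, hv2, ?_⟩
              have hne : (some w == some v) = false := by
                simp; rintro rfl; exact hw ⟨hv1, hv2⟩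
              simpa [List.count_cons, hne] using hc

lemma main_eq (labels : List (Option Int)) (window mpc : Int) :
    window_indices_with_class_floor_py labels window mpc
      = window_indices_with_class_floor_py_alt labels window mpc := by
  unfold window_indices_with_class_floor_py window_indices_with_class_floor_py_alt
  simp only []
  by_cases h0 : (labels.length : Int) = 0
  · rw [if_pos h0, if_pos h0]
  · rw [if_neg h0, if_neg h0]
    set n : Int := (labels.length : Int) with hn
    set start : Int := max 0 (n - max 1 window) with hstart
    set floor : Int := max 1 mpc with hfloor
    set counts : List Int := labels.foldl stepCnt [0, 0, 0, 0] with hcounts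
    set skip : List Int := counts.map (fun c => c - min c floor) with hskip
    rw [foldl_stepB, List.nil_append]
    apply PySem.List.sorted_eq_of_perm_of_pairwise_lt
    · -- same elements, both without duplicates
      apply (List.perm_ext_iff_of_nodup ?knd ?snd).mpr
      case knd => exact (kept_pairwise start skip labels 0 [0,0,0,0]).imp (fun h => ne_of_lt h)
      case snd => exact nodup_foldl_stepA labels mpc _ _ (PySem.Set.nodup_ofList _)
      intro i
      rw [kept_mem start skip labels 0 [0,0,0,0] rfl i, mem_foldl_stepA]
      simp only [PySem.Set.mem_ofList, PySem.List.mem_pyRange_one]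
      have hstart0 : 0 ≤ start := by rw [hstart]; exact le_max_left _ _
      have hcl : counts.length = 4 := by rw [hcounts, cnt_length]; rfl
      have hskipv : ∀ v : Int, 0 ≤ v → v < 4 →
          (skip[v.toNat]?).getD 0
            = (labels.count (some v) : Int) - min ((labels.count (some v) : Int)) floor := by
        intro v h1 h2
        have hvlt : v.toNat < 4 := by omega
        have hc : (counts[v.toNat]?).getD 0 = (labels.count (some v) : Int) := by
          have hg := cnt_getD labels [0,0,0,0] rfl v ⟨h1, h2⟩
          rw [← hcounts] at hg
          rw [hg]
          interval_cases h : v.toNat <;> simp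
        rw [hskip, List.getElem?_map]
        rw [List.getElem?_eq_getElem (by omega : v.toNat < counts.length)]
        simp only [Option.map_some, Option.getD_some]
        have hx : counts[v.toNat] = (counts[v.toNat]?).getD 0 := by
          rw [List.getElem?_eq_getElem (by omega : v.toNat < counts.length)]; rfl
        rw [hx, hc]
      have hseen0 : ∀ v : Int, 0 ≤ v → v < 4 → ((([0,0,0,0] : List Int)[v.toNat]?)).getD 0 = 0 := by
        intro v h1 h2
        have hvlt : v.toNat < 4 := by omega
        interval_cases h : v.toNat <;> simp
      constructor
      · rintro ⟨j, hj, rfl, (h | ⟨v, hg, hv1, hv2, hc⟩)⟩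
        · left
          constructor
          · simpa using h
          · simp only [zero_add]; omega
        · right
          refine ⟨v, ⟨hv1, hv2⟩, ?_⟩
          rw [mem_drop_ci]
          refine ⟨j, hj, rfl, hg, ?_⟩
          rw [hskipv v hv1 hv2, hseen0 v hv1 hv2] at hc
          have hcieq : (ci labels 0 v).length = labels.count (some v) := ci_length labels 0 v
          rw [dropCnt, hcieq]
          rw [← hfloor]
          omega
      · rintro (⟨h1, h2⟩ | ⟨v, hv, hmem2⟩)
        · have h0i : (0 : Int) ≤ i := le_trans hstart0 h1
          refine ⟨i.toNat, by omega, by omega, Or.inl (by omega)⟩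
        · rw [mem_drop_ci] at hmem2
          rcases hmem2 with ⟨j, hj, rfl, hg, hc⟩
          refine ⟨j, hj, rfl, Or.inr ⟨v, hg, hv.1, hv.2, ?_⟩⟩
          rw [hskipv v hv.1 hv.2, hseen0 v hv.1 hv.2]
          have hcieq : (ci labels 0 v).length = labels.count (some v) := ci_length labels 0 v
          rw [dropCnt, hcieq, ← hfloor] at hc
          omega
    · exact kept_pairwise start skip labels 0 [0,0,0,0]

-- ===== VERDICT (by name: the statement is the Claim_ definition above) =====
theorem window_indices_with_class_floor_py_spec : Claim_equal_window_indices_with_class_floor_py := by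
  intro labels window mpc _
  exact main_eq labels window mpc
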